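-- pv_equiv track=rewrite | github.com/kant1724/vpds_ta | detection/models/b_jaro_winkler/engine/run.py | get_part_of_tokenized_text
-- ===== SOURCE A (Python) =====
-- def get_part_of_tokenized_text(tokenized_text, nouns):
--     last_word = nouns[len(nouns) - 1]
--     last_word_cnt = 0
--     for n in nouns:
--         if n == last_word:
--             last_word_cnt += 1
--     tt_word_cnt = 0
--     res = ''
--     for tt in tokenized_text:
--         res += tt + " "
--         if tt == last_word:
--             tt_word_cnt += 1
--         if tt_word_cnt == last_word_cnt:
--             return res
--
--     return res
-- ===== SOURCE B (Python) =====
-- def get_part_of_tokenized_text(tokenized_text, nouns):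
--     last = nouns[-1]
--     target = nouns.count(last)
--     cutoff = len(tokenized_text)
--     cnt = 0
--     for i, tt in enumerate(tokenized_text):
--         if tt == last:
--             cnt += 1
--             if cnt == target:
--                 cutoff = i + 1
--                 break
--     prefix = tokenized_text[:cutoff]
--     return " ".join(prefix) + " " if prefix else ""
-- ===== Notes on version B (the rewrite author's own statement) =====
-- stated objective: simpler
-- what changed: Replaces the accumulate-while-checking loop (string built token by token inside the scan) with a locate-the-cutoff index pass followed by a single slice-and-join construction, and replaces the hand-written counting loop with nouns.count.
import Mathlib
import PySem

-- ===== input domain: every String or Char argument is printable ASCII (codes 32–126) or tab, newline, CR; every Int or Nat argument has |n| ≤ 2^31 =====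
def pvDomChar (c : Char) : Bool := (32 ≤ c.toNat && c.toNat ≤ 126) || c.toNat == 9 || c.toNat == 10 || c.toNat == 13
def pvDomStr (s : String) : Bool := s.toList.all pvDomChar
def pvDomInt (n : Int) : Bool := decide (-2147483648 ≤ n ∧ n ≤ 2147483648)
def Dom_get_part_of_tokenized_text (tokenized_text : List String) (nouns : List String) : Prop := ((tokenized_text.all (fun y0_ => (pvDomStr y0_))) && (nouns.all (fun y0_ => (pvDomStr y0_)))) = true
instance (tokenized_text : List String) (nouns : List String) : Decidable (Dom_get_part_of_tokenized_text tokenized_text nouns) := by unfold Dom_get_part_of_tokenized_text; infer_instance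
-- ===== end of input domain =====

-- B replaces A's accumulate-while-checking string loop by a locate-the-cutoff pass plus one
-- slice-and-join construction (objective: simpler).

-- ===== PORT A =====
-- A's main loop: res += tt + " "; count matches; return res once the count reaches last_word_cnt.
def pvALoop (last_word : String) (target : Int) : Int → String → List String → String
  | _, res, [] => res
  | cnt, res, tt :: rest =>
    let res' := res ++ tt ++ " "
    let cnt' := if tt == last_word then cnt + 1 else cnt
    if cnt' == target then res' else pvALoop last_word target cnt' res' rest

def get_part_of_tokenized_text (tokenized_text : List String) (nouns : List String) : String :=
  -- nouns[len(nouns)-1]; raises IndexError on nouns = [] (excluded by Pre_), getD is unreachable there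
  let last_word := (PySem.List.pyGet? nouns ((nouns.length : Int) - 1)).getD ""
  let last_word_cnt : Int := nouns.foldl (fun c n => if n == last_word then c + 1 else c) 0
  pvALoop last_word last_word_cnt 0 "" tokenized_text

-- ===== PORT B =====
-- B's locating loop: index of the token after the target-th occurrence of last, default = length.
def pvFindCutoff (last : String) (target : Nat) : Nat → Nat → List String → Nat
  | _, i, [] => i
  | cnt, i, tt :: rest =>
    if tt == last then
      if cnt + 1 == target then i + 1 else pvFindCutoff last target (cnt + 1) (i + 1) rest
    else pvFindCutoff last target cnt (i + 1) rest

def get_part_of_tokenized_text_alt (tokenized_text : List String) (nouns : List String) : String :=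
  -- nouns[-1]; raises IndexError on nouns = [] (excluded by Pre_), getD is unreachable there
  let last := (PySem.List.pyGet? nouns (-1)).getD ""
  let target := PySem.List.count nouns last
  let cutoff := pvFindCutoff last target 0 0 tokenized_text
  let pref := tokenized_text.take cutoff
  if pref.isEmpty then "" else PySem.Str.join " " pref ++ " "

-- ===== PRECONDITION & SPEC =====
-- Pre_ excludes nouns = [], on which A (nouns[len(nouns)-1]) raises IndexError (B raises there too).
def Pre_get_part_of_tokenized_text (tokenized_text : List String) (nouns : List String) : Prop := nouns ≠ []
instance (tokenized_text : List String) (nouns : List String) : Decidable (Pre_get_part_of_tokenized_text tokenized_text nouns) := by unfold Pre_get_part_of_tokenized_text; infer_instance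
def pvWitness_get_part_of_tokenized_text : List String × List String := (["the", "cat", "sat"], ["cat"])

def Spec_get_part_of_tokenized_text (tokenized_text : List String) (nouns : List String) (out : String) : Prop := out = get_part_of_tokenized_text_alt tokenized_text nouns
instance (tokenized_text : List String) (nouns : List String) (out : String) : Decidable (Spec_get_part_of_tokenized_text tokenized_text nouns out) := by unfold Spec_get_part_of_tokenized_text; infer_instance

-- ===== CLAIM (what is proved, stated in full; the proofs are below) =====
def Claim_equal_get_part_of_tokenized_text : Prop := ∀ (tokenized_text : List String) (nouns : List String), Dom_get_part_of_tokenized_text tokenized_text nouns → Pre_get_part_of_tokenized_text tokenized_text nouns → Spec_get_part_of_tokenized_text tokenized_text nouns (get_part_of_tokenized_text tokenized_text nouns)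

-- ===== LEMMAS AND PROOFS =====

-- right-nested "token + space" concatenation: the value both programs build
def pvJoinSp : List String → String
  | [] => ""
  | t :: ts => t ++ " " ++ pvJoinSp ts

theorem pvJoinSp_eq_join (xs : List String) :
    (if xs.isEmpty then "" else PySem.Str.join " " xs ++ " ") = pvJoinSp xs := by
  induction xs with
  | nil => simp [pvJoinSp]
  | cons t ts ih =>
    cases ts with
    | nil =>
      apply String.toList_inj.mp
      simp [pvJoinSp, PySem.Str.toList_join, PySem.Chars.join_singleton]
    | cons u us =>
      simp only [List.isEmpty_cons, Bool.false_eq_true, if_false] at ih ⊢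
      apply String.toList_inj.mp
      have hih := congrArg String.toList ih
      simp only [String.toList_append] at hih ⊢
      rw [PySem.Str.toList_join]
      simp only [List.map_cons]
      rw [PySem.Chars.join_cons_cons,
          show pvJoinSp (t :: u :: us) = t ++ " " ++ pvJoinSp (u :: us) from rfl]
      simp only [String.toList_append, List.append_assoc]
      rw [PySem.Str.toList_join] at hih
      simp only [List.map_cons] at hih
      rw [← hih]

theorem pvFindCutoff_shift (last : String) (target : Nat) (xs : List String) :
    ∀ cnt i, pvFindCutoff last target cnt i xs = i + pvFindCutoff last target cnt 0 xs := by
  induction xs with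
  | nil => intro cnt i; simp [pvFindCutoff]
  | cons tt rest ih =>
    intro cnt i
    by_cases h : (tt == last) = true <;> by_cases h2 : (cnt + 1 == target) = true <;>
      simp only [pvFindCutoff, h, h2, if_true, if_false, Bool.false_eq_true] <;>
      first
        | omega
        | (rw [ih _ (i + 1), ih _ 1]; omega)

theorem pvALoop_eq (last : String) (target : Nat) (xs : List String) :
    ∀ (cnt : Nat) (res : String), cnt < target →
      pvALoop last (target : Int) (cnt : Int) res xs
        = res ++ pvJoinSp (xs.take (pvFindCutoff last target cnt 0 xs)) := by
  induction xs with
  | nil => intro cnt res _; simp [pvALoop, pvFindCutoff, pvJoinSp]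
  | cons tt rest ih =>
    intro cnt res hlt
    by_cases h : (tt == last) = true
    · by_cases h2 : cnt + 1 = target
      · have hc : ((if (tt == last) = true then (cnt : Int) + 1 else (cnt : Int)) == (target : Int)) = true := by
          simp only [h, if_true, beq_iff_eq]; exact_mod_cast h2
        simp only [pvALoop, hc, if_true]
        have hf : pvFindCutoff last target cnt 0 (tt :: rest) = 1 := by
          simp [pvFindCutoff, h, h2]
        rw [hf]
        simp only [List.take_succ_cons, List.take_zero, pvJoinSp,
          String.append_assoc, String.append_empty]
      · have hc : ((if (tt == last) = true then (cnt : Int) + 1 else (cnt : Int)) == (target : Int)) = false := by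
          simp only [h, if_true, beq_eq_false_iff_ne, ne_eq]
          intro hx; exact h2 (by exact_mod_cast hx)
        simp only [pvALoop, h, if_true]
        rw [show ((cnt : Int) + 1) = ((cnt + 1 : Nat) : Int) by push_cast; ring]
        rw [ih (cnt + 1) _ (by omega)]
        have hf : pvFindCutoff last target cnt 0 (tt :: rest)
            = pvFindCutoff last target (cnt + 1) 0 rest + 1 := by
          simp only [pvFindCutoff, h, if_true]
          rw [if_neg (show ¬((cnt + 1 == target) = true) by simpa using h2)]
          rw [pvFindCutoff_shift last target rest (cnt + 1) (0 + 1)]; omega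
        rw [hf, List.take_succ_cons]
        have hcc : (((cnt + 1 : Nat) : Int) == ((target : Nat) : Int)) = false := by
          simp only [beq_eq_false_iff_ne, ne_eq, Nat.cast_inj]; exact h2
        simp only [hcc, Bool.false_eq_true, if_false, pvJoinSp, String.append_assoc]
    · have hc : ((if (tt == last) = true then (cnt : Int) + 1 else (cnt : Int)) == (target : Int)) = false := by
        simp only [h, Bool.false_eq_true, if_false, beq_eq_false_iff_ne, ne_eq]
        intro hx; omega
      simp only [pvALoop, h, Bool.false_eq_true, if_false]
      rw [ih cnt _ hlt]
      have hf : pvFindCutoff last target cnt 0 (tt :: rest)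
          = pvFindCutoff last target cnt 0 rest + 1 := by
        simp only [pvFindCutoff, h, Bool.false_eq_true, if_false]
        rw [pvFindCutoff_shift last target rest cnt 1]; omega
      rw [hf, List.take_succ_cons]
      have hcc : (((cnt : Nat) : Int) == ((target : Nat) : Int)) = false := by
        simp only [beq_eq_false_iff_ne, ne_eq, Nat.cast_inj]; omega
      simp only [hcc, Bool.false_eq_true, if_false, pvJoinSp, String.append_assoc]

-- ===== VERDICT (by name: the statement is the Claim_ definition above) =====
theorem get_part_of_tokenized_text_spec : Claim_equal_get_part_of_tokenized_text := by
  intro tokenized_text nouns _ hpre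
  unfold Spec_get_part_of_tokenized_text get_part_of_tokenized_text get_part_of_tokenized_text_alt
  dsimp only
  have hidx : ((nouns.length : Int) - 1) = ((nouns.length - 1 : Nat) : Int) := by
    cases nouns with
    | nil => exact absurd rfl hpre
    | cons a l => push_cast [Nat.cast_sub (by simp : 1 ≤ (a :: l).length)]; ring
  have hlw : (PySem.List.pyGet? nouns ((nouns.length : Int) - 1)).getD ""
      = (PySem.List.pyGet? nouns (-1)).getD "" := by
    rw [hidx, PySem.List.pyGet?_natCast, PySem.List.pyGet?_neg_one,
        List.getLast?_eq_getElem?, Nat.sub_one]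
  rw [hlw]
  set lw := (PySem.List.pyGet? nouns (-1)).getD "" with hlwdef
  have hcount : (nouns.foldl (fun c n => if n == lw then c + 1 else c) 0 : Int)
      = ((PySem.List.count nouns lw : Nat) : Int) := by
    rw [PySem.List.count_eq, PySem.List.foldl_beq_add_one]; ring
  rw [hcount]
  have hmem : lw ∈ nouns := by
    have hg1 : PySem.List.pyGet? nouns (-1) = nouns.getLast? := PySem.List.pyGet?_neg_one nouns
    cases hg : nouns.getLast? with
    | none => exact absurd (List.getLast?_eq_none_iff.mp hg) hpre
    | some x =>
      have hx : lw = x := by rw [hlwdef, hg1, hg]; rfl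
      rw [hx]
      exact List.mem_of_getLast? hg
  have hpos : 0 < PySem.List.count nouns lw := by
    rw [PySem.List.count_eq]; exact List.count_pos_iff.mpr hmem
  rw [show ((0 : Int)) = ((0 : Nat) : Int) by simp]
  rw [pvALoop_eq lw (PySem.List.count nouns lw) tokenized_text 0 "" hpos]
  rw [← pvJoinSp_eq_join]
  simp
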